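-- pv_equiv track=rewrite | github.com/WenjunSUN1997/reading_order_ar_sep | utils/evaluator.py | gt_generate
-- ===== SOURCE A (Python) =====
-- def gt_generate(length):
--     length_record = []
--     begin = 0
--     while length >= 1 :
--         end = length - 1 + begin
--         length_record.append([begin, end])
--         begin = end
--         length -= 1
--
--     return length_record
-- ===== SOURCE B (Python) =====
-- def gt_generate(length):
--     result = []
--     for i in range(length):
--         begin = i * (length - 1) - i * (i - 1) // 2
--         result.append([begin, begin + (length - 1 - i)])
--     return result
-- ===== Notes on version B (the rewrite author's own statement) =====
-- stated objective: alternative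
-- what changed: Replaces the while loop carrying a running 'begin' accumulator with an index-driven pass: each interval's start is computed by the closed form i*(length-1) - i*(i-1)//2, so no state is threaded between iterations.
import Mathlib
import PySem

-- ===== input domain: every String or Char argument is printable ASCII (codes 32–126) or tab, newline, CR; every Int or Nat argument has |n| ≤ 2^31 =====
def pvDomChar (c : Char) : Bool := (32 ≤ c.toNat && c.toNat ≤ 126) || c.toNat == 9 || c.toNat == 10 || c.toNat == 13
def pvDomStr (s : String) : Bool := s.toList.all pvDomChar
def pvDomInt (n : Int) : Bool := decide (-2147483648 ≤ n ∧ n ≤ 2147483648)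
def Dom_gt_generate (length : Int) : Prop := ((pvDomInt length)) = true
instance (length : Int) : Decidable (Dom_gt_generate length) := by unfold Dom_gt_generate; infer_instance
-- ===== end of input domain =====

-- B replaces A's accumulator-carrying while loop by a closed-form start index per position (alternative decomposition, same cost).

-- ===== PORT A =====
-- the while loop of A: state (length, begin), appending [begin, end] each turn
def gtGenGo (length begin_ : Int) : List (List Int) :=
  if h : length ≥ 1 then
    let e := length - 1 + begin_
    [begin_, e] :: gtGenGo (length - 1) e
  else []
termination_by length.toNat
decreasing_by omega

def gt_generate (length : Int) : List (List Int) := gtGenGo length 0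

-- ===== PORT B =====
def gt_generate_alt (length : Int) : List (List Int) :=
  (PySem.List.pyRange 0 length 1).map (fun i =>
    let begin_ := i * (length - 1) - PySem.Int.floordiv (i * (i - 1)) 2
    [begin_, begin_ + (length - 1 - i)])

-- ===== PRECONDITION & SPEC =====
def Spec_gt_generate (length : Int) (out : List (List Int)) : Prop := out = gt_generate_alt length
instance (length : Int) (out : List (List Int)) : Decidable (Spec_gt_generate length out) := by unfold Spec_gt_generate; infer_instance

-- ===== CLAIM (what is proved, stated in full; the proofs are below) =====
def Claim_equal_gt_generate : Prop := ∀ (length : Int), Dom_gt_generate length → Spec_gt_generate length (gt_generate length)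

-- ===== LEMMAS AND PROOFS =====

-- i*(i-1) is even, so the Python floor division is exact
theorem two_mul_fd (i : Int) : 2 * PySem.Int.floordiv (i * (i - 1)) 2 = i * (i - 1) := by
  have he : Even (i * (i - 1)) := by
    have := Int.even_mul_succ_self (i - 1)
    simpa [mul_comm, sub_add_cancel] using this
  obtain ⟨m, hm⟩ := he
  rw [PySem.Int.floordiv_eq_ediv_of_pos (by norm_num)]
  rw [hm]
  have : m + m = 2 * m := by ring
  rw [this, Int.mul_ediv_cancel_left _ (by norm_num)]

theorem fd_succ (k : Int) :
    PySem.Int.floordiv ((k + 1) * k) 2 = PySem.Int.floordiv (k * (k - 1)) 2 + k := by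
  have h1 := two_mul_fd (k + 1)
  have h2 := two_mul_fd k
  have h1' : 2 * PySem.Int.floordiv ((k + 1) * k) 2 = k ^ 2 + k := by
    rw [show (k + 1) * ((k + 1) - 1) = (k + 1) * k by ring] at h1; rw [h1]; ring
  have h2' : 2 * PySem.Int.floordiv (k * (k - 1)) 2 = k ^ 2 - k := by rw [h2]; ring
  omega

-- loop invariant: the loop from (L, b) produces the closed-form intervals offset by b
theorem gtGenGo_eq (n : Nat) : ∀ (L b : Int), L.toNat = n →
    gtGenGo L b = (List.range n).map (fun (k : Nat) =>
      let s := b + (k : Int) * (L - 1) - PySem.Int.floordiv ((k : Int) * ((k : Int) - 1)) 2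
      [s, s + (L - 1 - (k : Int))]) := by
  induction n with
  | zero =>
    intro L b hL
    rw [gtGenGo]
    simp [show ¬ (L ≥ 1) by omega]
  | succ n ih =>
    intro L b hL
    rw [gtGenGo]
    simp only [show L ≥ 1 by omega, dif_pos]
    rw [ih (L - 1) (L - 1 + b) (by omega)]
    rw [List.range_succ_eq_map]
    simp only [List.map_cons, List.map_map]
    refine List.cons_eq_cons.mpr ⟨?_, ?_⟩
    · simp [PySem.Int.floordiv]; omega
    · apply List.map_congr_left
      intro k _
      simp only [Function.comp_apply, Nat.succ_eq_add_one]
      have hc : ((k + 1 : Nat) : Int) = (k : Int) + 1 := by push_cast; ring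
      rw [hc]
      rw [show ((k : Int) + 1) * ((k : Int) + 1 - 1) = ((k : Int) + 1) * (k : Int) by ring]
      rw [fd_succ (k : Int)]
      refine congrArg₂ _ (by ring) (congrArg₂ _ (by ring) rfl)

-- ===== VERDICT (by name: the statement is the Claim_ definition above) =====
theorem gt_generate_spec : Claim_equal_gt_generate := by
  intro L _
  unfold Spec_gt_generate gt_generate gt_generate_alt
  rw [gtGenGo_eq L.toNat L 0 rfl, PySem.List.pyRange_one, List.map_map]
  rw [show (L - 0).toNat = L.toNat by omega]
  apply List.map_congr_left
  intro k _
  simp only [Function.comp_apply]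
  norm_num
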